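-- pv_equiv track=rewrite | github.com/CityofToronto/bdit_congestion | congestion_grid/best_group_partition.py | return_results
-- ===== SOURCE A (Python) =====
-- from itertools import combinations, chain
--
-- def split_list(data, n):
--     for splits in combinations(range(1, len(data)), n-1):
--         result = []
--         prev = None
--         for split in chain(splits, [None]):
--             result.append(data[prev:split])
--             prev = split
--         yield result
--
-- def return_results(length_set, groups):
--     possibility = []
--     for q in range(groups[0], groups[1]):
--         split_result = split_list(length_set, q)
--         for a in split_result:
--             possibility.append(a)
--     group_result = []
--     group_set = []
--     for groups in possibility:
--         result = []
--         sets = []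
--         for set in groups:
--             sum_length = sum(set)
--             result.append(sum_length)
--             sets.append(set)
--         group_result.append(result)
--         group_set.append(sets)
--     return group_result, group_set
-- ===== SOURCE B (Python) =====
-- def _go(rest, g):
--     # enumerate contiguous partitions of rest into g groups as (sums, groups) pairs,
--     # first cut chosen in increasing order (itertools.combinations order)
--     if g == 1:
--         return [([sum(rest)], [rest])]
--     if g > len(rest):
--         return []  # fewer elements than groups: no partition
--     out = []
--     for i in range(1, len(rest)):
--         head = rest[:i]
--         hs = sum(head)
--         for s, t in _go(rest[i:], g - 1):
--             out.append(([hs] + s, [head] + t))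
--     return out
--
-- def return_results(length_set, groups):
--     group_result = []
--     group_set = []
--     for q in range(groups[0], groups[1]):
--         for s, t in _go(length_set, q):
--             group_result.append(s)
--             group_set.append(t)
--     return group_result, group_set
-- ===== Notes on version B (the rewrite author's own statement) =====
-- stated objective: alternative
-- what changed: Replaces the combinations-of-cut-indices generator plus a separate second pass that re-walks every partition to build the two sum/group lists with a single recursive enumerator over list suffixes that emits each partition together with its group sums in one pass.
import Mathlib
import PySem

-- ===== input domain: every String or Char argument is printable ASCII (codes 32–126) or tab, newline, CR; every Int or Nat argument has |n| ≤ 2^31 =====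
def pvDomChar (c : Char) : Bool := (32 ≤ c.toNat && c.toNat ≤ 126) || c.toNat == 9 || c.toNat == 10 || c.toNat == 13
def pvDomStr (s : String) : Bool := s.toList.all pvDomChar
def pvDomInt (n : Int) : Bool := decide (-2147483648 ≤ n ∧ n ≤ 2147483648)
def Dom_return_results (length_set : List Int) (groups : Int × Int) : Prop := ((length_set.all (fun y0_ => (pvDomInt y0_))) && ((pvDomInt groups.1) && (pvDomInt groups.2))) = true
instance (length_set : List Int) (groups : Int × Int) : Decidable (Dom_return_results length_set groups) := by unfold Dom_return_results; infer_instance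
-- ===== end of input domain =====

-- B replaces combinations-based split_list plus a separate summing pass by one recursive
-- partition enumerator that emits each partition's group sums inline (objective: alternative).

-- ===== PORT A =====
-- data[prev:split] where prev/split are None or Python ints produced by range(1, len(data))
-- (nonnegative, in range): exact as clamped take/drop (PySem.List.slice semantics).
def sliceA (data : List Int) (p s : Option Nat) : List Int :=
  (data.take (s.getD data.length)).drop (p.getD 0)

-- the inner 'for split in chain(splits, [None])' loop of split_list, with its prev state
def buildLoop (data : List Int) (prev : Option Nat) : List (Option Nat) → List (List Int)
  | [] => []
  | s :: rest => sliceA data prev s :: buildLoop data s rest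

-- split_list(data, n): combinations(range(1, len(data)), n-1); n ≥ 1 on admitted inputs
-- (Python raises ValueError for n-1 < 0; Pre_ excludes that, .toNat is arbitrary there).
def splitListA (data : List Int) (n : Int) : List (List (List Int)) :=
  (PySem.List.combinations (List.range' 1 (data.length - 1)) (n - 1).toNat).map
    (fun splits => buildLoop data none (splits.map some ++ [none]))

def return_results (length_set : List Int) (groups : Int × Int) :
    List (List Int) × List (List (List Int)) :=
  let possibility := (PySem.List.pyRange groups.1 groups.2 1).foldl
    (fun acc q => acc ++ splitListA length_set q) []
  possibility.foldl
    (fun st gs =>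
      let rs := gs.foldl (fun st2 s => (st2.1 ++ [s.sum], st2.2 ++ [s])) ([], [])
      (st.1 ++ [rs.1], st.2 ++ [rs.2]))
    ([], [])

-- ===== PORT B =====
-- _go(rest, g): all contiguous partitions of rest into g groups, as (sums, groups) pairs
def goB (rest : List Int) (g : Int) : List (List Int × List (List Int)) :=
  if g = 1 then [([rest.sum], [rest])]
  else if (rest.length : Int) < g then []
  else (List.range' 1 (rest.length - 1)).attach.flatMap
    (fun i => (goB (rest.drop i.1) (g - 1)).map
      (fun p => ((rest.take i.1).sum :: p.1, rest.take i.1 :: p.2)))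
termination_by rest.length
decreasing_by
  have h := List.mem_range'_1.mp i.2
  simp only [List.length_drop]
  omega

def return_results_alt (length_set : List Int) (groups : Int × Int) :
    List (List Int) × List (List (List Int)) :=
  (PySem.List.pyRange groups.1 groups.2 1).foldl
    (fun st q => (goB length_set q).foldl
      (fun st2 p => (st2.1 ++ [p.1], st2.2 ++ [p.2])) st)
    ([], [])

-- ===== PRECONDITION & SPEC =====
-- Pre_ excludes exactly the inputs where A raises: if range(groups[0], groups[1]) is
-- nonempty and starts at q ≤ 0, combinations(..., q-1) raises ValueError.
def Pre_return_results (length_set : List Int) (groups : Int × Int) : Prop :=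
  groups.2 ≤ groups.1 ∨ 1 ≤ groups.1
instance (length_set : List Int) (groups : Int × Int) : Decidable (Pre_return_results length_set groups) := by unfold Pre_return_results; infer_instance

def pvWitness_return_results : List Int × (Int × Int) := ([3, 1, 2], (1, 4))

def Spec_return_results (length_set : List Int) (groups : Int × Int) (out : List (List Int) × List (List (List Int))) : Prop := out = return_results_alt length_set groups
instance (length_set : List Int) (groups : Int × Int) (out : List (List Int) × List (List (List Int))) : Decidable (Spec_return_results length_set groups out) := by unfold Spec_return_results; infer_instance

-- ===== CLAIM (what is proved, stated in full; the proofs are below) =====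
def Claim_equal_return_results : Prop := ∀ (length_set : List Int) (groups : Int × Int), Dom_return_results length_set groups → Pre_return_results length_set groups → Spec_return_results length_set groups (return_results length_set groups)

-- ===== LEMMAS AND PROOFS =====

-- the canonical partition: cuts relative to the front of `data`
def partsR (data : List Int) : List Nat → List (List Int)
  | [] => [data]
  | c :: cs => data.take c :: partsR (data.drop c) (cs.map (· - c))
termination_by cs => cs.length
decreasing_by simp

lemma buildLoop_eq_partsR (cs : List Nat) : ∀ (data : List Int) (p : Nat),
    (p :: cs).Pairwise (· < ·) →
    buildLoop data (some p) (cs.map some ++ [none]) = partsR (data.drop p) (cs.map (· - p)) := by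
  induction cs with
  | nil =>
    intro data p _
    simp [buildLoop, sliceA, partsR]
  | cons c cs ih =>
    intro data p hp
    have hpc : p < c := (List.pairwise_cons.mp hp).1 c (by simp)
    have hcs : ∀ x ∈ cs, c < x := fun x hx =>
      (List.pairwise_cons.mp (List.pairwise_cons.mp hp).2).1 x hx
    have hch : (c :: cs).Pairwise (· < ·) := (List.pairwise_cons.mp hp).2
    simp only [List.map_cons, List.cons_append, buildLoop, partsR]
    refine List.cons_eq_cons.mpr ⟨?_, ?_⟩
    · simp only [sliceA, Option.getD_some]
      rw [List.drop_take]
    · rw [ih data c hch]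
      have h1 : (data.drop p).drop (c - p) = data.drop c := by
        rw [List.drop_drop]
        congr 1
        omega
      have h2 : (cs.map (· - p)).map (· - (c - p)) = cs.map (· - c) := by
        rw [List.map_map]
        apply List.map_congr_left
        intro x hx
        have := hcs x hx
        simp only [Function.comp]
        omega
      rw [h1, h2]

lemma buildLoop_none (data : List Int) (cs : List Nat) :
    buildLoop data none (cs.map some ++ [none]) = buildLoop data (some 0) (cs.map some ++ [none]) := by
  cases cs <;> simp [buildLoop, sliceA]

-- first-cut decomposition of CPython's combinations order on a contiguous range
lemma combinations_range' (r : Nat) : ∀ (m a : Nat),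
    PySem.List.combinations (List.range' a m) (r + 1) =
      (List.range' a m).flatMap
        (fun i => (PySem.List.combinations (List.range' (i + 1) (a + m - i - 1)) r).map (i :: ·)) := by
  intro m
  induction m with
  | zero => intro a; simp [PySem.List.combinations_nil_succ]
  | succ m ih =>
    intro a
    rw [List.range'_succ, PySem.List.combinations_cons_succ, ih (a + 1), List.flatMap_cons]
    have hb2 : a + (m + 1) = (a + 1) + m := by omega
    simp only [hb2]
    have hb : a + 1 + m - a - 1 = m := by omega
    simp only [hb]

-- shift: combinations over a shifted range are shifted combinations
lemma combinations_range'_shift (r k m : Nat) :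
    PySem.List.combinations (List.range' (1 + k) m) r =
      (PySem.List.combinations (List.range' 1 m) r).map (List.map (· + k)) := by
  have h : List.range' (1 + k) m = (List.range' 1 m).map (· + k) := by
    rw [List.range'_eq_map_range, List.range'_eq_map_range, List.map_map]
    congr 1
    funext x
    simp only [Function.comp]
    omega
  rw [h, PySem.List.combinations_map]

-- main: B's enumerator is A's combinations pipeline with sums attached
lemma goB_eq_aux : ∀ (n : Nat) (d : List Int), d.length ≤ n → ∀ (g : Int), 1 ≤ g →
    goB d g = (PySem.List.combinations (List.range' 1 (d.length - 1)) (g - 1).toNat).map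
      (fun s => ((partsR d s).map List.sum, partsR d s)) := by
  intro n
  induction n with
  | zero =>
    intro d hd g hg
    have hd0 : d = [] := List.eq_nil_of_length_eq_zero (by omega)
    subst hd0
    by_cases h1 : g = 1
    · subst h1
      rw [goB.eq_def]
      simp [partsR]
    · rw [goB.eq_def, if_neg h1, if_pos (by simp; omega)]
      have ht : (g - 1).toNat = (g - 2).toNat + 1 := by omega
      rw [ht]
      simp [PySem.List.combinations_nil_succ]
  | succ n ih =>
    intro d hd g hg
    by_cases h1 : g = 1
    · subst h1
      rw [goB.eq_def]
      simp [partsR]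
    · have hg2 : 2 ≤ g := by omega
      by_cases hbig : (d.length : Int) < g
      · rw [goB.eq_def, if_neg h1, if_pos hbig]
        have : PySem.List.combinations (List.range' 1 (d.length - 1)) (g - 1).toNat = [] :=
          PySem.List.combinations_eq_nil_of_length_lt _ (by simp [List.length_range']; omega)
        rw [this]
        simp
      rw [goB.eq_def, if_neg h1, if_neg hbig]
      have hgt : (g - 1).toNat = (g - 2).toNat + 1 := by omega
      rw [hgt, combinations_range', List.map_flatMap]
      have hatt : (List.range' 1 (d.length - 1)).attach.flatMap
            (fun i => (goB (d.drop i.1) (g - 1)).map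
              (fun p => ((d.take i.1).sum :: p.1, d.take i.1 :: p.2)))
          = (List.range' 1 (d.length - 1)).flatMap
            (fun i => (goB (d.drop i) (g - 1)).map
              (fun p => ((d.take i).sum :: p.1, d.take i :: p.2))) := by
        simp
      rw [hatt]
      apply List.flatMap_congr
      intro i hi
      have hmem := List.mem_range'_1.mp hi
      have hi1 : 1 ≤ i := hmem.1
      have hilt : i < d.length := by omega
      rw [ih (d.drop i) (by simp; omega) (g - 1) (by omega)]
      have hg11 : g - 1 - 1 = g - 2 := by ring
      have hlen : (d.drop i).length - 1 = d.length - i - 1 := by simp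
      rw [hg11, hlen]
      have hb : 1 + (d.length - 1) - i - 1 = d.length - i - 1 := by omega
      rw [hb]
      have hia : i + 1 = 1 + i := by omega
      rw [hia, combinations_range'_shift]
      rw [List.map_map, List.map_map, List.map_map]
      apply List.map_congr_left
      intro s hs
      simp only [Function.comp, partsR, List.map_cons]
      have hsi : (s.map (· + i)).map (· - i) = s := by
        rw [List.map_map]
        conv_rhs => rw [← List.map_id s]
        apply List.map_congr_left
        intro x _
        simp [Function.comp]
      rw [hsi]

lemma splitListA_eq (d : List Int) (q : Int) :
    splitListA d q = (PySem.List.combinations (List.range' 1 (d.length - 1)) (q - 1).toNat).map (partsR d) := by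
  unfold splitListA
  apply List.map_congr_left
  intro s hs
  have hsub : s.Sublist (List.range' 1 (d.length - 1)) :=
    PySem.List.sublist_of_mem_combinations hs
  have hpw : s.Pairwise (· < ·) :=
    List.Pairwise.sublist hsub (List.pairwise_lt_range' 1)
  have hge : ∀ x ∈ s, 0 < x := by
    intro x hx
    have := List.mem_range'_1.mp (hsub.subset hx)
    omega
  have hpw0 : (0 :: s).Pairwise (· < ·) := List.pairwise_cons.mpr ⟨hge, hpw⟩
  rw [buildLoop_none, buildLoop_eq_partsR s d 0 hpw0]
  simp

-- one partition to its (sums, groups) pair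
def pairF (part : List (List Int)) : List Int × List (List Int) := (part.map List.sum, part)

-- the enumerators agree on each admitted group count q ≥ 1
lemma goB_eq_splitListA (d : List Int) (q : Int) (hq : 1 ≤ q) :
    goB d q = (splitListA d q).map pairF := by
  rw [goB_eq_aux d.length d le_rfl q hq, splitListA_eq, List.map_map]
  rfl

-- a fold appending to two parallel lists is two maps
lemma innerB_eq (L : List (List Int × List (List Int)))
    (st : List (List Int) × List (List (List Int))) :
    L.foldl (fun st2 p => (st2.1 ++ [p.1], st2.2 ++ [p.2])) st
      = (st.1 ++ L.map (·.1), st.2 ++ L.map (·.2)) := by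
  obtain ⟨a, b⟩ := st
  calc L.foldl (fun st2 p => (st2.1 ++ [p.1], st2.2 ++ [p.2])) (a, b)
      = (L.foldl (fun x p => x ++ [p.1]) a, L.foldl (fun x p => x ++ [p.2]) b) :=
        PySem.List.foldl_prod_mk (fun x p => x ++ [p.1]) (fun x p => x ++ [p.2]) L a b
    _ = (a ++ L.map (·.1), b ++ L.map (·.2)) := by
        rw [PySem.List.foldl_append_singleton_eq_map, PySem.List.foldl_append_singleton_eq_map]

-- the two parallel accumulator lists of A's summing pass
lemma innerA_eq (gs : List (List Int)) :
    gs.foldl (fun st2 s => (st2.1 ++ [s.sum], st2.2 ++ [s]))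
        (([], []) : List Int × List (List Int)) = (gs.map List.sum, gs) := by
  calc gs.foldl (fun st2 s => (st2.1 ++ [s.sum], st2.2 ++ [s])) ([], [])
      = (gs.foldl (fun x s => x ++ [s.sum]) [], gs.foldl (fun x s => x ++ [s]) []) :=
        PySem.List.foldl_prod_mk (fun x s => x ++ [s.sum]) (fun x s => x ++ [s]) gs [] []
    _ = (gs.map List.sum, gs) := by
        rw [PySem.List.foldl_append_singleton_eq_map, PySem.List.foldl_append_singleton_eq_self]
        simp

lemma A_char (ls : List Int) (g1 g2 : Int) :
    return_results ls (g1, g2) =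
      (((PySem.List.pyRange g1 g2 1).flatMap (splitListA ls)).map (fun gsx => gsx.map List.sum),
       (PySem.List.pyRange g1 g2 1).flatMap (splitListA ls)) := by
  unfold return_results
  dsimp only
  rw [PySem.List.foldl_append_eq_flatMap]
  have hstep : (fun (st : List (List Int) × List (List (List Int))) (gsx : List (List Int)) =>
        (st.1 ++ [(gsx.foldl (fun st2 s => (st2.1 ++ [s.sum], st2.2 ++ [s])) ([], [])).1],
         st.2 ++ [(gsx.foldl (fun st2 s => (st2.1 ++ [s.sum], st2.2 ++ [s])) ([], [])).2]))
      = fun st gsx => (st.1 ++ [gsx.map List.sum], st.2 ++ [gsx]) := by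
    funext st gsx
    rw [innerA_eq gsx]
  rw [hstep]
  calc ((PySem.List.pyRange g1 g2 1).flatMap (splitListA ls)).foldl
        (fun st gsx => (st.1 ++ [gsx.map List.sum], st.2 ++ [gsx])) ([], [])
      = (((PySem.List.pyRange g1 g2 1).flatMap (splitListA ls)).foldl (fun x gsx => x ++ [gsx.map List.sum]) [],
         ((PySem.List.pyRange g1 g2 1).flatMap (splitListA ls)).foldl (fun x gsx => x ++ [gsx]) []) :=
        PySem.List.foldl_prod_mk (fun (x : List (List Int)) (gsx : List (List Int)) => x ++ [gsx.map List.sum]) (fun (x : List (List (List Int))) (gsx : List (List Int)) => x ++ [gsx]) _ [] []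
    _ = _ := by
        rw [PySem.List.foldl_append_singleton_eq_map, PySem.List.foldl_append_singleton_eq_self]
        simp

lemma B_char (ls : List Int) (g1 g2 : Int) :
    return_results_alt ls (g1, g2) =
      (((PySem.List.pyRange g1 g2 1).flatMap (goB ls)).map (·.1),
       ((PySem.List.pyRange g1 g2 1).flatMap (goB ls)).map (·.2)) := by
  unfold return_results_alt
  have hstep : (fun (st : List (List Int) × List (List (List Int))) (q : Int) =>
        (goB ls q).foldl (fun st2 p => (st2.1 ++ [p.1], st2.2 ++ [p.2])) st)
      = fun st q => (st.1 ++ (goB ls q).map (·.1), st.2 ++ (goB ls q).map (·.2)) := by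
    funext st q
    exact innerB_eq _ st
  rw [hstep]
  calc (PySem.List.pyRange g1 g2 1).foldl
        (fun st q => (st.1 ++ (goB ls q).map (·.1), st.2 ++ (goB ls q).map (·.2))) ([], [])
      = ((PySem.List.pyRange g1 g2 1).foldl (fun x q => x ++ (goB ls q).map (·.1)) [],
         (PySem.List.pyRange g1 g2 1).foldl (fun x q => x ++ (goB ls q).map (·.2)) []) :=
        PySem.List.foldl_prod_mk (fun (x : List (List Int)) (q : Int) => x ++ (goB ls q).map (·.1)) (fun (x : List (List (List Int))) (q : Int) => x ++ (goB ls q).map (·.2)) _ [] []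
    _ = _ := by
        rw [PySem.List.foldl_append_eq_flatMap, PySem.List.foldl_append_eq_flatMap]
        rw [← List.map_flatMap, ← List.map_flatMap]
        simp

-- ===== VERDICT (by name: the statement is the Claim_ definition above) =====
theorem return_results_spec : Claim_equal_return_results := by
  intro ls g _ hpre
  obtain ⟨g1, g2⟩ := g
  unfold Spec_return_results
  rw [A_char, B_char]
  have hq : ∀ q ∈ PySem.List.pyRange g1 g2 1, goB ls q = (splitListA ls q).map pairF := by
    intro q hmem
    have hb := (PySem.List.mem_pyRange_one).mp hmem
    apply goB_eq_splitListA
    unfold Pre_return_results at hpre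
    rcases hpre with h | h <;> omega
  rw [List.flatMap_congr hq, ← List.map_flatMap]
  simp only [List.map_map]
  refine Prod.ext ?_ ?_
  · apply List.map_congr_left
    intro part _
    rfl
  · conv_lhs => rw [← List.map_id (List.flatMap (splitListA ls) (PySem.List.pyRange g1 g2 1))]
    apply List.map_congr_left
    intro part _
    rfl
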